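-- pv_equiv track=rewrite | github.com/wasdw1012/applet- | incremental_id_hunter.py | _identify_form_type
-- ===== SOURCE A (Python) =====
-- from typing import List, Dict, Set, Optional, Any, Tuple, Union
--
-- def _identify_form_type(form: Dict[str, Any]) -> str:
--     """识别表单类型"""
--     fields = form.get('fields', [])
--     field_names = [f.get('name', '').lower() for f in fields]
--
--     # 登录表单
--     if any(name in field_names for name in ['username', 'password', 'login', 'email']):
--         return 'login'
--
--     # 注册表单
--     if any(name in field_names for name in ['register', 'signup', 'confirm_password']):
--         return 'registration'
--
--     # 患者信息表单
--     if any(name in field_names for name in ['patient_name', 'patient_id', 'diagnosis', 'symptoms']):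
--         return 'patient_info'
--
--     # 预约表单
--     if any(name in field_names for name in ['appointment', 'booking', 'schedule']):
--         return 'appointment'
--
--     # 搜索表单
--     if any(name in field_names for name in ['search', 'query', 'find']):
--         return 'search'
--
--     return 'unknown'
-- ===== SOURCE B (Python) =====
-- _CATEGORIES = ['login', 'registration', 'patient_info', 'appointment', 'search']
--
-- _KW_RANK = {
--     'username': 0, 'password': 0, 'login': 0, 'email': 0,
--     'register': 1, 'signup': 1, 'confirm_password': 1,
--     'patient_name': 2, 'patient_id': 2, 'diagnosis': 2, 'symptoms': 2,
--     'appointment': 3, 'booking': 3, 'schedule': 3,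
--     'search': 4, 'query': 4, 'find': 4,
-- }
--
--
-- def _rank(name):
--     return _KW_RANK.get(name, len(_CATEGORIES))
--
--
-- def _identify_form_type(form):
--     """识别表单类型"""
--     best = len(_CATEGORIES)
--     for f in form.get('fields', []):
--         best = min(best, _rank(f.get('name', '').lower()))
--     return _CATEGORIES[best] if best < len(_CATEGORIES) else 'unknown'
-- ===== Notes on version B (the rewrite author's own statement) =====
-- stated objective: simpler
-- what changed: Replaces the five ordered keyword-group membership scans over field_names with one keyword->priority-rank dict and a single pass over the fields keeping the minimum rank, indexing a category table at the end.
import Mathlib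
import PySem

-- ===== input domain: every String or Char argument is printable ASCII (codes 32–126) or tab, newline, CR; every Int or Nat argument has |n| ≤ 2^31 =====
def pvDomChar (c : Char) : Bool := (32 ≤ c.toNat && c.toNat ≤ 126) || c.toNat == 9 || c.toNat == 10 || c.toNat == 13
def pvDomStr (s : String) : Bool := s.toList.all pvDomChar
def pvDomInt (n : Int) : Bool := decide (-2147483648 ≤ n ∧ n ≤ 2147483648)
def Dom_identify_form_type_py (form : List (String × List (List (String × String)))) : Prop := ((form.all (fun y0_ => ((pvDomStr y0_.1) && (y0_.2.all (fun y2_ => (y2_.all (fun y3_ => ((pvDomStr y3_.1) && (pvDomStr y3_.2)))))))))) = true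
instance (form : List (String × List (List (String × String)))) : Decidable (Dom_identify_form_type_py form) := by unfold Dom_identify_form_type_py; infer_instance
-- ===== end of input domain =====

-- B replaces A's five ordered keyword-group scans with one keyword->rank dict and a single
-- minimum-rank pass over the fields (objective: simpler); same return value everywhere.


-- ===== PORT A =====
def identify_form_type_py (form : List (String × List (List (String × String)))) : String :=
  let fields := match List.find? (fun kv => kv.1 == "fields") form with
    | some kv => kv.2
    | none => []
  let field_names := fields.map (fun f =>
    PySem.Str.lower (match List.find? (fun kv => kv.1 == "name") f with
      | some kv => kv.2
      | none => ""))
  if (["username", "password", "login", "email"] : List String).any (fun name => field_names.contains name) then "login"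
  else if (["register", "signup", "confirm_password"] : List String).any (fun name => field_names.contains name) then "registration"
  else if (["patient_name", "patient_id", "diagnosis", "symptoms"] : List String).any (fun name => field_names.contains name) then "patient_info"
  else if (["appointment", "booking", "schedule"] : List String).any (fun name => field_names.contains name) then "appointment"
  else if (["search", "query", "find"] : List String).any (fun name => field_names.contains name) then "search"
  else "unknown"

-- ===== PORT B =====
def bCategories : List String := ["login", "registration", "patient_info", "appointment", "search"]

def bKwRank : PySem.Dict String Int := PySem.Dict.mk
  [("username", 0), ("password", 0), ("login", 0), ("email", 0),
   ("register", 1), ("signup", 1), ("confirm_password", 1),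
   ("patient_name", 2), ("patient_id", 2), ("diagnosis", 2), ("symptoms", 2),
   ("appointment", 3), ("booking", 3), ("schedule", 3),
   ("search", 4), ("query", 4), ("find", 4)]

def bRank (name : String) : Int := PySem.Dict.getD bKwRank name (PySem.List.len bCategories)

def identify_form_type_py_alt (form : List (String × List (List (String × String)))) : String :=
  let fields := match List.find? (fun kv => kv.1 == "fields") form with
    | some kv => kv.2
    | none => []
  let best : Int := fields.foldl (fun best f =>
    min best (bRank (PySem.Str.lower (match List.find? (fun kv => kv.1 == "name") f with
      | some kv => kv.2
      | none => "")))) (PySem.List.len bCategories)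
  if best < PySem.List.len bCategories then PySem.List.pyGetD bCategories best "unknown"
  else "unknown"

-- ===== PRECONDITION & SPEC =====
def Spec_identify_form_type_py (form : List (String × List (List (String × String)))) (out : String) : Prop := out = identify_form_type_py_alt form
instance (form : List (String × List (List (String × String)))) (out : String) : Decidable (Spec_identify_form_type_py form out) := by unfold Spec_identify_form_type_py; infer_instance

-- ===== CLAIM (what is proved, stated in full; the proofs are below) =====
def Claim_equal_identify_form_type_py : Prop := ∀ (form : List (String × List (List (String × String)))), Dom_identify_form_type_py form → Spec_identify_form_type_py form (identify_form_type_py form)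

-- ===== LEMMAS AND PROOFS =====

-- all 17 keywords of A's five groups
def gAll : List String := ["username", "password", "login", "email", "register", "signup",
  "confirm_password", "patient_name", "patient_id", "diagnosis", "symptoms",
  "appointment", "booking", "schedule", "search", "query", "find"]

lemma bRank_of_not_mem {n : String} (hm : n ∉ gAll) : bRank n = 5 := by
  simp only [gAll, List.mem_cons, List.not_mem_nil, or_false, not_or] at hm
  obtain ⟨h1, h2, h3, h4, h5, h6, h7, h8, h9, h10, h11, h12, h13, h14, h15, h16, h17⟩ := hm
  simp [bRank, bKwRank, PySem.Dict.getD, PySem.Dict.get?,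
    bCategories, PySem.List.len, Ne.symm h1, Ne.symm h2, Ne.symm h3, Ne.symm h4,
    Ne.symm h5, Ne.symm h6, Ne.symm h7, Ne.symm h8, Ne.symm h9, Ne.symm h10,
    Ne.symm h11, Ne.symm h12, Ne.symm h13, Ne.symm h14, Ne.symm h15, Ne.symm h16, Ne.symm h17]

lemma bRank_nonneg (n : String) : 0 ≤ bRank n := by
  by_cases hm : n ∈ gAll
  · fin_cases hm <;> decide
  · rw [bRank_of_not_mem hm]; norm_num

lemma bRank_le0 (n : String) : bRank n ≤ 0 ↔ n ∈ (["username", "password", "login", "email"] : List String) := by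
  by_cases hm : n ∈ gAll
  · fin_cases hm <;> decide
  · rw [bRank_of_not_mem hm]
    constructor
    · intro h; exact absurd h (by norm_num)
    · intro h; exfalso; fin_cases h <;> exact hm (by decide)

lemma bRank_le1 (n : String) : bRank n ≤ 1 ↔
    n ∈ (["username", "password", "login", "email"] : List String) ∨
    n ∈ (["register", "signup", "confirm_password"] : List String) := by
  by_cases hm : n ∈ gAll
  · fin_cases hm <;> decide
  · rw [bRank_of_not_mem hm]
    constructor
    · intro h; exact absurd h (by norm_num)
    · rintro (h | h) <;> (exfalso; fin_cases h <;> exact hm (by decide))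

lemma bRank_le2 (n : String) : bRank n ≤ 2 ↔
    n ∈ (["username", "password", "login", "email"] : List String) ∨
    n ∈ (["register", "signup", "confirm_password"] : List String) ∨
    n ∈ (["patient_name", "patient_id", "diagnosis", "symptoms"] : List String) := by
  by_cases hm : n ∈ gAll
  · fin_cases hm <;> decide
  · rw [bRank_of_not_mem hm]
    constructor
    · intro h; exact absurd h (by norm_num)
    · rintro (h | h | h) <;> (exfalso; fin_cases h <;> exact hm (by decide))

lemma bRank_le3 (n : String) : bRank n ≤ 3 ↔
    n ∈ (["username", "password", "login", "email"] : List String) ∨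
    n ∈ (["register", "signup", "confirm_password"] : List String) ∨
    n ∈ (["patient_name", "patient_id", "diagnosis", "symptoms"] : List String) ∨
    n ∈ (["appointment", "booking", "schedule"] : List String) := by
  by_cases hm : n ∈ gAll
  · fin_cases hm <;> decide
  · rw [bRank_of_not_mem hm]
    constructor
    · intro h; exact absurd h (by norm_num)
    · rintro (h | h | h | h) <;> (exfalso; fin_cases h <;> exact hm (by decide))

lemma bRank_le4 (n : String) : bRank n ≤ 4 ↔
    n ∈ (["username", "password", "login", "email"] : List String) ∨
    n ∈ (["register", "signup", "confirm_password"] : List String) ∨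
    n ∈ (["patient_name", "patient_id", "diagnosis", "symptoms"] : List String) ∨
    n ∈ (["appointment", "booking", "schedule"] : List String) ∨
    n ∈ (["search", "query", "find"] : List String) := by
  by_cases hm : n ∈ gAll
  · fin_cases hm <;> decide
  · rw [bRank_of_not_mem hm]
    constructor
    · intro h; exact absurd h (by norm_num)
    · rintro (h | h | h | h | h) <;> (exfalso; fin_cases h <;> exact hm (by decide))

lemma fold_min_le_iff (l : List String) (b k : Int) :
    List.foldl (fun acc n => min acc (bRank n)) b l ≤ k ↔ b ≤ k ∨ ∃ n ∈ l, bRank n ≤ k := by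
  induction l generalizing b with
  | nil => simp
  | cons a t ih =>
    rw [List.foldl_cons, ih]
    constructor
    · rintro (h | ⟨n, hn, hr⟩)
      · rcases min_le_iff.mp h with h' | h'
        · exact Or.inl h'
        · exact Or.inr ⟨a, List.mem_cons_self, h'⟩
      · exact Or.inr ⟨n, List.mem_cons_of_mem _ hn, hr⟩
    · rintro (h | ⟨n, hn, hr⟩)
      · exact Or.inl (min_le_iff.mpr (Or.inl h))
      · rcases List.mem_cons.mp hn with rfl | hn'
        · exact Or.inl (min_le_iff.mpr (Or.inr hr))
        · exact Or.inr ⟨n, hn', hr⟩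

lemma hit_iff (names g : List String) :
    (g.any (fun kw => names.contains kw) = true) ↔ ∃ n ∈ names, n ∈ g := by
  simp only [List.any_eq_true, List.contains_iff_mem]
  exact ⟨fun ⟨k, h1, h2⟩ => ⟨k, h2, h1⟩, fun ⟨k, h1, h2⟩ => ⟨k, h2, h1⟩⟩

lemma foldl_min_map (fs : List (List (String × String))) (b : Int) :
    fs.foldl (fun best f =>
      min best (bRank (PySem.Str.lower (match List.find? (fun kv => kv.1 == "name") f with
        | some kv => kv.2
        | none => "")))) b
    = (fs.map (fun f => PySem.Str.lower (match List.find? (fun kv => kv.1 == "name") f with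
        | some kv => kv.2
        | none => ""))).foldl (fun acc n => min acc (bRank n)) b := by
  induction fs generalizing b with
  | nil => rfl
  | cons a t ih =>
    simp only [List.foldl_cons, List.map_cons]
    exact ih _

lemma chain_eq (names : List String) :
    (if (["username", "password", "login", "email"] : List String).any (fun name => names.contains name) then ("login" : String)
     else if (["register", "signup", "confirm_password"] : List String).any (fun name => names.contains name) then "registration"
     else if (["patient_name", "patient_id", "diagnosis", "symptoms"] : List String).any (fun name => names.contains name) then "patient_info"
     else if (["appointment", "booking", "schedule"] : List String).any (fun name => names.contains name) then "appointment"
     else if (["search", "query", "find"] : List String).any (fun name => names.contains name) then "search"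
     else "unknown")
    = (if List.foldl (fun acc n => min acc (bRank n)) (PySem.List.len bCategories) names < PySem.List.len bCategories
       then PySem.List.pyGetD bCategories (List.foldl (fun acc n => min acc (bRank n)) (PySem.List.len bCategories) names) "unknown"
       else "unknown") := by
  have h5 : PySem.List.len bCategories = (5 : Int) := rfl
  rw [h5]
  have hle : ∀ k : Int, List.foldl (fun acc n => min acc (bRank n)) (5 : Int) names ≤ k ↔
      (5 : Int) ≤ k ∨ ∃ n ∈ names, bRank n ≤ k := fun k => fold_min_le_iff names 5 k
  by_cases h0 : ∃ n ∈ names, bRank n ≤ 0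
  · have c0 : ((["username", "password", "login", "email"] : List String).any (fun name => names.contains name)) = true := by
      rw [hit_iff]
      obtain ⟨n, hn, hr⟩ := h0
      exact ⟨n, hn, (bRank_le0 n).mp hr⟩
    have hb : List.foldl (fun acc n => min acc (bRank n)) (5 : Int) names = 0 := by
      have h1 := (hle 0).mpr (Or.inr h0)
      have h2 : ¬ List.foldl (fun acc n => min acc (bRank n)) (5 : Int) names ≤ -1 := by
        intro hc
        rcases (hle (-1)).mp hc with h | ⟨n, _, hr⟩
        · omega
        · have := bRank_nonneg n; omega
      omega
    rw [c0, hb, show (if (0:Int) < 5 then PySem.List.pyGetD bCategories (0:Int) "unknown" else "unknown") = "login" from by decide]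
    simp
  · have c0 : ((["username", "password", "login", "email"] : List String).any (fun name => names.contains name)) = false := by
      rw [Bool.eq_false_iff]
      intro hc
      obtain ⟨n, hn, hg⟩ := (hit_iff names _).mp hc
      exact h0 ⟨n, hn, (bRank_le0 n).mpr hg⟩
    by_cases h1 : ∃ n ∈ names, bRank n ≤ 1
    · have c1 : ((["register", "signup", "confirm_password"] : List String).any (fun name => names.contains name)) = true := by
        rw [hit_iff]
        obtain ⟨n, hn, hr⟩ := h1
        rcases (bRank_le1 n).mp hr with hg | hg
        · exact absurd ⟨n, hn, (bRank_le0 n).mpr hg⟩ h0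
        · exact ⟨n, hn, hg⟩
      have hb : List.foldl (fun acc n => min acc (bRank n)) (5 : Int) names = 1 := by
        have ha := (hle 1).mpr (Or.inr h1)
        have hz : ¬ List.foldl (fun acc n => min acc (bRank n)) (5 : Int) names ≤ 0 := by
          intro hc
          rcases (hle 0).mp hc with h | h
          · omega
          · exact h0 h
        omega
      rw [c0, c1, hb, show (if (1:Int) < 5 then PySem.List.pyGetD bCategories (1:Int) "unknown" else "unknown") = "registration" from by decide]
      simp
    · have c1 : ((["register", "signup", "confirm_password"] : List String).any (fun name => names.contains name)) = false := by
        rw [Bool.eq_false_iff]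
        intro hc
        obtain ⟨n, hn, hg⟩ := (hit_iff names _).mp hc
        exact h1 ⟨n, hn, (bRank_le1 n).mpr (Or.inr hg)⟩
      by_cases h2 : ∃ n ∈ names, bRank n ≤ 2
      · have c2 : ((["patient_name", "patient_id", "diagnosis", "symptoms"] : List String).any (fun name => names.contains name)) = true := by
          rw [hit_iff]
          obtain ⟨n, hn, hr⟩ := h2
          rcases (bRank_le2 n).mp hr with hg | hg | hg
          · exact absurd ⟨n, hn, (bRank_le0 n).mpr hg⟩ h0
          · exact absurd ⟨n, hn, (bRank_le1 n).mpr (Or.inr hg)⟩ h1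
          · exact ⟨n, hn, hg⟩
        have hb : List.foldl (fun acc n => min acc (bRank n)) (5 : Int) names = 2 := by
          have ha := (hle 2).mpr (Or.inr h2)
          have hz : ¬ List.foldl (fun acc n => min acc (bRank n)) (5 : Int) names ≤ 1 := by
            intro hc
            rcases (hle 1).mp hc with h | h
            · omega
            · exact h1 h
          omega
        rw [c0, c1, c2, hb, show (if (2:Int) < 5 then PySem.List.pyGetD bCategories (2:Int) "unknown" else "unknown") = "patient_info" from by decide]
        simp
      · have c2 : ((["patient_name", "patient_id", "diagnosis", "symptoms"] : List String).any (fun name => names.contains name)) = false := by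
          rw [Bool.eq_false_iff]
          intro hc
          obtain ⟨n, hn, hg⟩ := (hit_iff names _).mp hc
          exact h2 ⟨n, hn, (bRank_le2 n).mpr (Or.inr (Or.inr hg))⟩
        by_cases h3 : ∃ n ∈ names, bRank n ≤ 3
        · have c3 : ((["appointment", "booking", "schedule"] : List String).any (fun name => names.contains name)) = true := by
            rw [hit_iff]
            obtain ⟨n, hn, hr⟩ := h3
            rcases (bRank_le3 n).mp hr with hg | hg | hg | hg
            · exact absurd ⟨n, hn, (bRank_le0 n).mpr hg⟩ h0
            · exact absurd ⟨n, hn, (bRank_le1 n).mpr (Or.inr hg)⟩ h1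
            · exact absurd ⟨n, hn, (bRank_le2 n).mpr (Or.inr (Or.inr hg))⟩ h2
            · exact ⟨n, hn, hg⟩
          have hb : List.foldl (fun acc n => min acc (bRank n)) (5 : Int) names = 3 := by
            have ha := (hle 3).mpr (Or.inr h3)
            have hz : ¬ List.foldl (fun acc n => min acc (bRank n)) (5 : Int) names ≤ 2 := by
              intro hc
              rcases (hle 2).mp hc with h | h
              · omega
              · exact h2 h
            omega
          rw [c0, c1, c2, c3, hb, show (if (3:Int) < 5 then PySem.List.pyGetD bCategories (3:Int) "unknown" else "unknown") = "appointment" from by decide]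
          simp
        · have c3 : ((["appointment", "booking", "schedule"] : List String).any (fun name => names.contains name)) = false := by
            rw [Bool.eq_false_iff]
            intro hc
            obtain ⟨n, hn, hg⟩ := (hit_iff names _).mp hc
            exact h3 ⟨n, hn, (bRank_le3 n).mpr (Or.inr (Or.inr (Or.inr hg)))⟩
          by_cases h4 : ∃ n ∈ names, bRank n ≤ 4
          · have c4 : ((["search", "query", "find"] : List String).any (fun name => names.contains name)) = true := by
              rw [hit_iff]
              obtain ⟨n, hn, hr⟩ := h4
              rcases (bRank_le4 n).mp hr with hg | hg | hg | hg | hg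
              · exact absurd ⟨n, hn, (bRank_le0 n).mpr hg⟩ h0
              · exact absurd ⟨n, hn, (bRank_le1 n).mpr (Or.inr hg)⟩ h1
              · exact absurd ⟨n, hn, (bRank_le2 n).mpr (Or.inr (Or.inr hg))⟩ h2
              · exact absurd ⟨n, hn, (bRank_le3 n).mpr (Or.inr (Or.inr (Or.inr hg)))⟩ h3
              · exact ⟨n, hn, hg⟩
            have hb : List.foldl (fun acc n => min acc (bRank n)) (5 : Int) names = 4 := by
              have ha := (hle 4).mpr (Or.inr h4)
              have hz : ¬ List.foldl (fun acc n => min acc (bRank n)) (5 : Int) names ≤ 3 := by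
                intro hc
                rcases (hle 3).mp hc with h | h
                · omega
                · exact h3 h
              omega
            rw [c0, c1, c2, c3, c4, hb, show (if (4:Int) < 5 then PySem.List.pyGetD bCategories (4:Int) "unknown" else "unknown") = "search" from by decide]
            simp
          · have c4 : ((["search", "query", "find"] : List String).any (fun name => names.contains name)) = false := by
              rw [Bool.eq_false_iff]
              intro hc
              obtain ⟨n, hn, hg⟩ := (hit_iff names _).mp hc
              exact h4 ⟨n, hn, (bRank_le4 n).mpr (Or.inr (Or.inr (Or.inr (Or.inr hg))))⟩
            have hb : List.foldl (fun acc n => min acc (bRank n)) (5 : Int) names = 5 := by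
              have ha := (hle 5).mpr (Or.inl le_rfl)
              have hz : ¬ List.foldl (fun acc n => min acc (bRank n)) (5 : Int) names ≤ 4 := by
                intro hc
                rcases (hle 4).mp hc with h | h
                · omega
                · exact h4 h
              omega
            rw [c0, c1, c2, c3, c4, hb, show (if (5:Int) < 5 then PySem.List.pyGetD bCategories (5:Int) "unknown" else "unknown") = "unknown" from by decide]
            simp

-- ===== VERDICT (by name: the statement is the Claim_ definition above) =====
set_option maxHeartbeats 1000000 in
theorem identify_form_type_py_spec : Claim_equal_identify_form_type_py := by
  intro form _
  show identify_form_type_py form = identify_form_type_py_alt form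
  simp only [identify_form_type_py, identify_form_type_py_alt]
  rw [foldl_min_map]
  exact chain_eq _
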